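-- pv_equiv track=rewrite | github.com/hyunsung1123/BaekJoon | 프로그래머스/unrated/133499. 옹알이 （2）/옹알이 （2）.py | solution
-- ===== SOURCE A (Python) =====
-- def solution(babbling):
--     answer = 0
--     for i in babbling:
--         my_answer = ["aya","ye","woo",'ma']
--         my_str=""
--         my_result = []
--         flag=True
--         for my_char in i:
--             my_str+=my_char
--             if (my_str in my_answer) and my_str not in my_result:
--                 my_result=[my_str]
--                 my_str=""
--         if my_str:
--             flag=False
--         if flag:
--             answer+=1
--     return answer
-- ===== SOURCE B (Python) =====
-- def solution(babbling):
--     syllables = ("aya", "ye", "woo", "ma")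
--
--     def pronounceable(word, prev):
--         if not word:
--             return True
--         for s in syllables:
--             if s != prev and word.startswith(s):
--                 return pronounceable(word[len(s):], s)
--         return False
--
--     return sum(1 for w in babbling if pronounceable(w, ""))
-- ===== Notes on version B (the rewrite author's own statement) =====
-- stated objective: simpler
-- what changed: Replaces A's per-character prefix-accumulation state machine (buffer + last-matched-syllable list) with a greedy recursion that strips one allowed syllable (different from the previous one) off the front of the word at a time via startswith.
import Mathlib
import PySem

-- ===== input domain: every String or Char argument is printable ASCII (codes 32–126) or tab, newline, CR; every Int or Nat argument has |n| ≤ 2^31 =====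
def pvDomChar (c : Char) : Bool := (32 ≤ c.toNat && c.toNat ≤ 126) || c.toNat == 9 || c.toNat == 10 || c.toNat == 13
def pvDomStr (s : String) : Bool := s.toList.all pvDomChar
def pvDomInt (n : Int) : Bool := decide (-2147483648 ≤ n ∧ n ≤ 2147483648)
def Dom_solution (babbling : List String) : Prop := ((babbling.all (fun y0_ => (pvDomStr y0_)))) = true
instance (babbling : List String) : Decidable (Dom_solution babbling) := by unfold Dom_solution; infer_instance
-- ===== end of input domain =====

-- B replaces A's per-character prefix-accumulation state machine by a greedy
-- syllable-at-a-time recursion (startswith + recurse on the remainder); objective: simpler.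


-- ===== PORT A =====
-- strings are handled as their char lists; my_answer / my_result hold char lists
def pvAnswerA : List (List Char) := [['a','y','a'], ['y','e'], ['w','o','o'], ['m','a']]

-- one iteration of A's inner loop: state = (my_str, my_result)
def stepA (st : List Char × List (List Char)) (c : Char) : List Char × List (List Char) :=
  let s := st.1 ++ [c]
  if s ∈ pvAnswerA ∧ s ∉ st.2 then ([], [s]) else (s, st.2)

def solution (babbling : List String) : Int :=
  babbling.foldl
    (fun answer i =>
      let st := i.toList.foldl stepA ([], [])
      let flag := st.1 = []          -- flag stays True iff my_str is empty at the end
      if flag then answer + 1 else answer)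
    0

-- ===== PORT B =====
def pvAya : List Char := ['a','y','a']
def pvYe  : List Char := ['y','e']
def pvWoo : List Char := ['w','o','o']
def pvMa  : List Char := ['m','a']

-- pronounceable(word, prev): the for-loop over the 4 syllables is unrolled in order
def okB : List Char → List Char → Bool
  | [], _ => true
  | c :: rest, prev =>
    if pvAya ≠ prev ∧ pvAya.isPrefixOf (c :: rest) then okB ((c :: rest).drop 3) pvAya
    else if pvYe ≠ prev ∧ pvYe.isPrefixOf (c :: rest) then okB ((c :: rest).drop 2) pvYe
    else if pvWoo ≠ prev ∧ pvWoo.isPrefixOf (c :: rest) then okB ((c :: rest).drop 3) pvWoo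
    else if pvMa ≠ prev ∧ pvMa.isPrefixOf (c :: rest) then okB ((c :: rest).drop 2) pvMa
    else false
  termination_by cs _ => cs.length
  decreasing_by all_goals simp

def solution_alt (babbling : List String) : Int :=
  ((babbling.countP fun w => okB w.toList []) : Int)

-- ===== PRECONDITION & SPEC =====
def Spec_solution (babbling : List String) (out : Int) : Prop := out = solution_alt babbling
instance (babbling : List String) (out : Int) : Decidable (Spec_solution babbling out) := by unfold Spec_solution; infer_instance

-- ===== CLAIM (what is proved, stated in full; the proofs are below) =====
def Claim_equal_solution : Prop := ∀ (babbling : List String), Dom_solution babbling → Spec_solution babbling (solution babbling)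

-- ===== LEMMAS AND PROOFS =====

-- my_result at the start of a segment: [] initially, [prev] afterwards
def resOf (prev : List Char) : List (List Char) := if prev = [] then [] else [prev]

-- if no reset ever fires, the buffer just accumulates the whole input
theorem noReset (cs : List Char) : ∀ (buf : List Char) (res : List (List Char)),
    (∀ s ∈ pvAnswerA, s ∉ res → ¬ s <+: (buf ++ cs)) →
    cs.foldl stepA (buf, res) = (buf ++ cs, res) := by
  induction cs with
  | nil => intro buf res _; simp
  | cons c cs ih =>
    intro buf res h
    have hstep : stepA (buf, res) c = (buf ++ [c], res) := by
      unfold stepA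
      simp only []
      rw [if_neg]
      rintro ⟨hmem, hnot⟩
      exact h _ hmem hnot ⟨cs, by simp⟩
    simp only [List.foldl_cons, hstep]
    rw [ih (buf ++ [c]) res (by simpa using h)]
    simp

-- core: A's inner loop empties its buffer iff B's recursion accepts
theorem core (cs prev : List Char) :
    ((cs.foldl stepA ([], resOf prev)).1 = []) ↔ okB cs prev = true := by
  induction cs, prev using okB.induct with
  | case1 prev => simp [okB]
  | case2 c rest prev h1 ih =>
    obtain ⟨hne, hpre⟩ := h1
    obtain ⟨t, ht⟩ := List.isPrefixOf_iff_prefix.mp hpre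
    have hne' : ¬ (['a','y','a'] = prev) := by simpa [pvAya] using hne
    have hdrop : (c :: rest).drop 3 = t := by rw [← ht]; rfl
    rw [okB, if_pos ⟨hne, hpre⟩, hdrop, ← ht]
    have hfold : (pvAya ++ t).foldl stepA ([], resOf prev)
        = t.foldl stepA ([], resOf pvAya) := by
      simp [pvAya, stepA, pvAnswerA, resOf, hne']
    rw [hfold]
    rw [hdrop] at ih
    exact ih
  | case3 c rest prev h1 h2 ih =>
    obtain ⟨hne, hpre⟩ := h2
    obtain ⟨t, ht⟩ := List.isPrefixOf_iff_prefix.mp hpre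
    have hne' : ¬ (['y','e'] = prev) := by simpa [pvYe] using hne
    have hdrop : (c :: rest).drop 2 = t := by rw [← ht]; rfl
    rw [okB, if_neg h1, if_pos ⟨hne, hpre⟩, hdrop, ← ht]
    have hfold : (pvYe ++ t).foldl stepA ([], resOf prev)
        = t.foldl stepA ([], resOf pvYe) := by
      simp [pvYe, stepA, pvAnswerA, resOf, hne']
    rw [hfold]
    rw [hdrop] at ih
    exact ih
  | case4 c rest prev h1 h2 h3 ih =>
    obtain ⟨hne, hpre⟩ := h3
    obtain ⟨t, ht⟩ := List.isPrefixOf_iff_prefix.mp hpre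
    have hne' : ¬ (['w','o','o'] = prev) := by simpa [pvWoo] using hne
    have hdrop : (c :: rest).drop 3 = t := by rw [← ht]; rfl
    rw [okB, if_neg h1, if_neg h2, if_pos ⟨hne, hpre⟩, hdrop, ← ht]
    have hfold : (pvWoo ++ t).foldl stepA ([], resOf prev)
        = t.foldl stepA ([], resOf pvWoo) := by
      simp [pvWoo, stepA, pvAnswerA, resOf, hne']
    rw [hfold]
    rw [hdrop] at ih
    exact ih
  | case5 c rest prev h1 h2 h3 h4 ih =>
    obtain ⟨hne, hpre⟩ := h4
    obtain ⟨t, ht⟩ := List.isPrefixOf_iff_prefix.mp hpre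
    have hne' : ¬ (['m','a'] = prev) := by simpa [pvMa] using hne
    have hdrop : (c :: rest).drop 2 = t := by rw [← ht]; rfl
    rw [okB, if_neg h1, if_neg h2, if_neg h3, if_pos ⟨hne, hpre⟩, hdrop, ← ht]
    have hfold : (pvMa ++ t).foldl stepA ([], resOf prev)
        = t.foldl stepA ([], resOf pvMa) := by
      simp [pvMa, stepA, pvAnswerA, resOf, hne']
    rw [hfold]
    rw [hdrop] at ih
    exact ih
  | case6 c rest prev h1 h2 h3 h4 =>
    rw [okB, if_neg h1, if_neg h2, if_neg h3, if_neg h4]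
    rw [noReset (c :: rest) [] (resOf prev) ?_]
    · simp
    · intro s hs hres hpref
      have hpre : s.isPrefixOf (c :: rest) = true :=
        List.isPrefixOf_iff_prefix.mpr (by simpa using hpref)
      have hsd : s = pvAya ∨ s = pvYe ∨ s = pvWoo ∨ s = pvMa := by
        simpa [pvAnswerA, pvAya, pvYe, pvWoo, pvMa] using hs
      have hnil : s ≠ [] := by
        rcases hsd with h|h|h|h <;> simp [h, pvAya, pvYe, pvWoo, pvMa]
      have hne : s ≠ prev := by
        intro h; subst h
        exact hres (by simp [resOf, hnil])
      rcases hsd with h|h|h|h <;> subst h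
      · exact h1 ⟨hne, hpre⟩
      · exact h2 ⟨hne, hpre⟩
      · exact h3 ⟨hne, hpre⟩
      · exact h4 ⟨hne, hpre⟩

-- counting transition: A's conditional +1 fold equals B's countP
theorem count_fold (l : List String) : ∀ (n : Int),
    l.foldl (fun answer i =>
      let st := i.toList.foldl stepA ([], [])
      let flag := st.1 = []
      if flag then answer + 1 else answer) n
    = n + ((l.countP fun w => okB w.toList []) : Int) := by
  induction l with
  | nil => intro n; simp
  | cons w l ih =>
    intro n
    have hw : ((w.toList.foldl stepA ([], [])).1 = []) ↔ okB w.toList [] = true := by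
      have := core w.toList []
      simpa [resOf] using this
    simp only [List.foldl_cons, List.countP_cons]
    by_cases h : okB w.toList [] = true
    · rw [if_pos (hw.mpr h), ih]
      simp [h]; ring
    · rw [if_neg (fun hh => h (hw.mp hh)), ih]
      simp [h]

-- ===== VERDICT (by name: the statement is the Claim_ definition above) =====
theorem solution_spec : Claim_equal_solution := by
  intro babbling _
  unfold Spec_solution solution solution_alt
  rw [count_fold]
  simp
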